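-- pv_equiv track=rewrite | github.com/flurinh/protos | src/protos/processing/gpcr/gpcr_families_processing.py | get_fam_identifier
-- ===== SOURCE A (Python) =====
-- from typing import List
--
-- def get_fam_identifier(prev_fam_identifier: List[int] = [-1, -1, -1, -1], new_index: int = 0):
--     # --- Potential Logic Issue ---
--     # This modifies the list passed in (or the default list) because lists are mutable!
--     # fam_identifier = prev_fam_identifier
--
--     # --- Corrected Logic: Create a copy ---
--     fam_identifier = prev_fam_identifier.copy() # Or list(prev_fam_identifier)
--
--     reset = False
--     # Ensure new_index is within bounds (optional but good practice)
--     if not (0 <= new_index < len(fam_identifier)):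
--         raise IndexError(f"new_index {new_index} is out of range for identifier length {len(fam_identifier)}")
--
--     for j in range(len(fam_identifier)): # Use length of the copied list
--         if reset:
--             fam_identifier[j] = 0
--         elif j == new_index:
--             # Increment the value at the target index
--             # Use the value from the *original* list before modification
--             fam_identifier[j] = prev_fam_identifier[j] + 1
--             # Set reset flag *after* processing the current index
--             if j < len(fam_identifier) - 1:
--                 reset = True
--         else:
--             # Keep elements before new_index as they were (already handled by copy)
--             continue
--             # Or explicitly: fam_identifier[j] = prev_fam_identifier[j] - but the copy does this.
--     return fam_identifier
-- ===== SOURCE B (Python) =====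
-- from typing import List
--
-- def get_fam_identifier(prev_fam_identifier: List[int] = [-1, -1, -1, -1], new_index: int = 0):
--     if not (0 <= new_index < len(prev_fam_identifier)):
--         raise IndexError(f"new_index {new_index} is out of range for identifier length {len(prev_fam_identifier)}")
--     return (prev_fam_identifier[:new_index]
--             + [prev_fam_identifier[new_index] + 1]
--             + [0] * (len(prev_fam_identifier) - new_index - 1))
-- ===== Notes on version B (the rewrite author's own statement) =====
-- stated objective: simpler
-- what changed: Replaces A's element-by-element loop with a maintained 'reset' boolean by a single slice-and-concatenate expression building the three segments (unchanged prefix, incremented element, zero tail) directly.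
import Mathlib
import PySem

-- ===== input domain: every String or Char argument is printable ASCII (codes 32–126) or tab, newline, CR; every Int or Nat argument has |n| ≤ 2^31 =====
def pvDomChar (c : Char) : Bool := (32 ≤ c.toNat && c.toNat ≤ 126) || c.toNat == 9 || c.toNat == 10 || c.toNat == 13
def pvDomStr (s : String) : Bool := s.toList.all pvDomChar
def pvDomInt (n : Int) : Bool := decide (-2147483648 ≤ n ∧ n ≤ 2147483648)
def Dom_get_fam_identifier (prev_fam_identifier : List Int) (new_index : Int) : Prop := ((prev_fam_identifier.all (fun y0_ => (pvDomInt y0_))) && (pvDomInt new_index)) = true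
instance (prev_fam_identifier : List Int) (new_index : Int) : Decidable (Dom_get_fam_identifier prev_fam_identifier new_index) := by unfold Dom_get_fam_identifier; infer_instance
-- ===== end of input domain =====

-- B replaces A's element-wise loop with a reset flag by one slice-and-concatenate expression (objective: simpler).


-- ===== PORT A =====
-- one loop step of A: j is the current index, state = (fam_identifier, reset)
def pvStepA (prev_fam_identifier : List Int) (new_index : Int) (st : List Int × Bool) (j : Nat) : List Int × Bool :=
  if st.2 then (st.1.set j 0, st.2)
  else if (j : Int) = new_index then
    (st.1.set j (prev_fam_identifier.getD j 0 + 1),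
     if (j : Int) < (st.1.length : Int) - 1 then true else st.2)
  else st

def get_fam_identifier (prev_fam_identifier : List Int) (new_index : Int) : List Int :=
  -- fam_identifier = prev_fam_identifier.copy(); the bounds check raises IndexError
  -- on out-of-range new_index (excluded by Pre_; [] stands in for the exception here)
  if ¬ (0 ≤ new_index ∧ new_index < (prev_fam_identifier.length : Int)) then []
  else
    ((List.range prev_fam_identifier.length).foldl
      (pvStepA prev_fam_identifier new_index) (prev_fam_identifier, false)).1

-- ===== PORT B =====
def get_fam_identifier_alt (prev_fam_identifier : List Int) (new_index : Int) : List Int :=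
  -- same bounds check / IndexError (excluded by Pre_; [] stands in for the exception)
  if ¬ (0 ≤ new_index ∧ new_index < (prev_fam_identifier.length : Int)) then []
  else
    PySem.List.slice prev_fam_identifier none (some new_index)
      ++ [(PySem.List.pyGet? prev_fam_identifier new_index).getD 0 + 1]
      ++ List.replicate ((prev_fam_identifier.length : Int) - new_index - 1).toNat 0

-- ===== PRECONDITION & SPEC =====
-- Pre_ excludes exactly the inputs on which A raises IndexError (new_index out of range).
def Pre_get_fam_identifier (prev_fam_identifier : List Int) (new_index : Int) : Prop :=
  0 ≤ new_index ∧ new_index < (prev_fam_identifier.length : Int)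
instance (prev_fam_identifier : List Int) (new_index : Int) : Decidable (Pre_get_fam_identifier prev_fam_identifier new_index) := by unfold Pre_get_fam_identifier; infer_instance
def pvWitness_get_fam_identifier : List Int × Int := ([3, 2, 5, 1], 1)
def Spec_get_fam_identifier (prev_fam_identifier : List Int) (new_index : Int) (out : List Int) : Prop := out = get_fam_identifier_alt prev_fam_identifier new_index
instance (prev_fam_identifier : List Int) (new_index : Int) (out : List Int) : Decidable (Spec_get_fam_identifier prev_fam_identifier new_index out) := by unfold Spec_get_fam_identifier; infer_instance

-- ===== CLAIM (what is proved, stated in full; the proofs are below) =====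
def Claim_equal_get_fam_identifier : Prop := ∀ (prev_fam_identifier : List Int) (new_index : Int), Dom_get_fam_identifier prev_fam_identifier new_index → Pre_get_fam_identifier prev_fam_identifier new_index → Spec_get_fam_identifier prev_fam_identifier new_index (get_fam_identifier prev_fam_identifier new_index)

-- ===== LEMMAS AND PROOFS =====

-- phase 1: before reaching new_index the loop leaves the state untouched
theorem pvPhase1 (prev : List Int) (ni : Int) (s k : Nat) (h : (s + k : Int) ≤ ni) :
    (List.range' s k).foldl (pvStepA prev ni) (prev, false) = (prev, false) := by
  induction k generalizing s with
  | zero => rfl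
  | succ k ih =>
    rw [List.range'_succ, List.foldl_cons]
    have hs : ¬ ((s : Int) = ni) := by push_cast at h; omega
    have hstep : pvStepA prev ni (prev, false) s = (prev, false) := by
      simp only [pvStepA]
      rw [if_neg (by simp), if_neg hs]
    rw [hstep]
    exact ih (s + 1) (by push_cast at h ⊢; omega)

-- phase 3: once reset is true, the loop just zeroes the remaining positions
theorem pvPhase3 (prev : List Int) (ni : Int) (l : List Int) (s k : Nat)
    (hlen : s + k = l.length) :
    (List.range' s k).foldl (pvStepA prev ni) (l, true) = (l.take s ++ List.replicate k 0, true) := by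
  induction k generalizing s l with
  | zero =>
    simp only [List.range'_zero, List.foldl_nil, List.replicate_zero, List.append_nil]
    rw [List.take_of_length_le (by omega)]
  | succ k ih =>
    rw [List.range'_succ, List.foldl_cons]
    simp only [pvStepA, if_true]
    rw [ih (l.set s 0) (s + 1) (by rw [List.length_set]; omega)]
    have hs : s < l.length := by omega
    have h1 : (l.set s 0).take (s + 1) = l.take s ++ [0] := by
      rw [List.take_add_one]
      congr 1
      · exact List.take_set_of_le (le_refl s)
      · simp [List.getElem?_set_self (by simpa using hs)]
    rw [h1]
    simp [List.replicate_succ]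

-- ===== VERDICT (by name: the statement is the Claim_ definition above) =====
theorem get_fam_identifier_spec : Claim_equal_get_fam_identifier := by
  intro prev ni _ hpre
  obtain ⟨h0, hlt⟩ := hpre
  unfold Spec_get_fam_identifier get_fam_identifier get_fam_identifier_alt
  rw [if_neg (not_not_intro ⟨h0, hlt⟩), if_neg (not_not_intro ⟨h0, hlt⟩)]
  set n := ni.toNat with hn
  have hni : (n : Int) = ni := Int.toNat_of_nonneg h0
  have hnlt : n < prev.length := by omega
  have hsplit : List.range prev.length
      = List.range' 0 n ++ n :: List.range' (n + 1) (prev.length - n - 1) := by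
    rw [List.range_eq_range']
    rw [show prev.length = n + (1 + (prev.length - n - 1)) by omega]
    rw [← List.range'_append, ← List.range'_append]
    simp [List.range'_one]
  rw [hsplit, List.foldl_append, pvPhase1 prev ni 0 n (by omega), List.foldl_cons]
  have hstep : pvStepA prev ni (prev, false) n
      = (prev.set n (prev.getD n 0 + 1),
         if (n : Int) < (prev.length : Int) - 1 then true else false) := by
    simp [pvStepA, hni]
  rw [hstep]
  have hset : prev.set n (prev.getD n 0 + 1)
      = prev.take n ++ (prev.getD n 0 + 1) :: prev.drop (n + 1) := by
    rw [List.set_eq_take_append_cons_drop, if_pos hnlt]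
  have hslice : PySem.List.slice prev none (some ni) = prev.take n := by
    rw [PySem.List.slice_to _ h0]
  have hget : (PySem.List.pyGet? prev ni).getD 0 = prev.getD n 0 := by
    rw [← hni, PySem.List.pyGet?_natCast]
    simp [List.getD, List.getElem?_eq_getElem hnlt]
  have htk : (prev.take n).length = n := by simp [hnlt.le]
  by_cases hlast : (n : Int) < (prev.length : Int) - 1
  · rw [if_pos hlast]
    rw [pvPhase3 prev ni _ (n + 1) (prev.length - n - 1) (by rw [List.length_set]; omega)]
    simp only
    rw [hset, hslice, hget]
    have h2 : ((prev.length : Int) - ni - 1).toNat = prev.length - n - 1 := by omega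
    rw [h2]
    rw [show n + 1 = (prev.take n).length + 1 by rw [htk]]
    rw [List.take_append]
    simp
  · rw [if_neg hlast]
    have hlen : prev.length = n + 1 := by omega
    have h3 : List.range' (n + 1) (prev.length - n - 1) = [] := by simp [hlen]
    rw [h3, List.foldl_nil]
    simp only
    rw [hset, hslice, hget]
    have h4 : ((prev.length : Int) - ni - 1).toNat = 0 := by omega
    rw [h4]
    simp [List.drop_eq_nil_of_le (by omega : prev.length ≤ n + 1)]
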